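-- pv_equiv track=rewrite | github.com/AnalyticalGraphicsInc/ODTKCodeExamples | OdtkMonteCarloTool/odtk_monte_toolbox/Data_Manage_Tbx.py | _split_tasks_evenly
-- ===== SOURCE A (Python) =====
-- from typing import List, Tuple
--
-- def _split_tasks_evenly(
--     num_threads: int, num_processes: int
-- ) -> Tuple[List[int], List[int]]:
--     """Helper method to event split indices for tasks to be threaded
--
--     Args:
--         num_threads (int): the number of parallel threads you want to run
--         num_processes (int): the total number of computations to spread across the
--         number of threads
--
--     Returns:
--         Tuple[List[int], List[int]]: A list of starting indices and a list of stopping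
--         indices
--     """
--     processes_per_thread = int(num_processes / num_threads)
--     remainder = num_processes % num_threads
--
--     start = []
--     end = []
--     last_index_assigned = 0
--     # Assign one extra processes per thread for the first remainder of threads to
--     # evenly distribute the processes
--     for _ in range(remainder):
--         start.append(last_index_assigned)
--         last_index_assigned = last_index_assigned + processes_per_thread + 1
--         end.append(last_index_assigned)
--
--     for _ in range(remainder + 1, num_threads + 1):
--         start.append(last_index_assigned)
--         last_index_assigned = last_index_assigned + processes_per_thread
--         end.append(last_index_assigned)
--
--     return (start, end)
-- ===== SOURCE B (Python) =====
-- def _split_tasks_evenly(num_threads, num_processes):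
--     q = int(num_processes / num_threads)
--     r = num_processes % num_threads
--     start = []
--     end = []
--     for i in range(num_threads):
--         s = i * q + min(i, r)
--         start.append(s)
--         end.append(s + q + (1 if i < r else 0))
--     return (start, end)
-- ===== Notes on version B (the rewrite author's own statement) =====
-- stated objective: simpler
-- what changed: Replaces the two-phase accumulator loops (first remainder threads, then the rest, threading last_index_assigned through) with a single loop over thread indices that computes each start/end directly from a closed-form formula i*q + min(i, r).
import Mathlib
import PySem

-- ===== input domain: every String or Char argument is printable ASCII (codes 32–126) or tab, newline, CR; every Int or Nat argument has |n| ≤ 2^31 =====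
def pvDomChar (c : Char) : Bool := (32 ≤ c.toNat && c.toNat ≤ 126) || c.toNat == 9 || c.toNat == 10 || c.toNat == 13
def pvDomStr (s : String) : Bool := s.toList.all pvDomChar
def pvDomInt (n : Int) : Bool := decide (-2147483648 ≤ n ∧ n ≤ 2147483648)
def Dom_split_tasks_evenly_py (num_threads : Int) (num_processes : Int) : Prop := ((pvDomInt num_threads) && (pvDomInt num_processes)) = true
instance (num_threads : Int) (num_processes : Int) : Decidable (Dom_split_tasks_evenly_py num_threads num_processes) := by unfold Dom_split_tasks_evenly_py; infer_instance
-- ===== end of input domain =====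

-- B replaces A's two-phase accumulator loops with a single index-driven loop using a
-- closed-form start/end formula; same O(num_threads) cost, simpler structure.

-- ===== PORT A =====
-- one body of A's append loop per call: appends last to start and last+inc to end, advances last
def pvLoopA (inc : Int) : Nat → List Int → List Int → Int → List Int × List Int × Int
  | 0, s, e, last => (s, e, last)
  | Nat.succ n, s, e, last => pvLoopA inc n (s ++ [last]) (e ++ [last + inc]) (last + inc)

-- int(num_processes / num_threads) truncates toward zero = Int.tdiv; this is exact on the
-- stated |n| ≤ 2^31 domain (the float quotient rounds within the same unit interval).
def split_tasks_evenly_py (num_threads : Int) (num_processes : Int) : List Int × List Int :=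
  let processes_per_thread := Int.tdiv num_processes num_threads
  let remainder := PySem.Int.mod num_processes num_threads
  let (s1, e1, last1) := pvLoopA (processes_per_thread + 1) remainder.toNat [] [] 0
  let (s2, e2, _) :=
    pvLoopA processes_per_thread ((num_threads + 1) - (remainder + 1)).toNat s1 e1 last1
  (s2, e2)

-- ===== PORT B =====
def split_tasks_evenly_py_alt (num_threads : Int) (num_processes : Int) : List Int × List Int :=
  let q := Int.tdiv num_processes num_threads
  let r := PySem.Int.mod num_processes num_threads
  (PySem.List.pyRange 0 num_threads 1).foldl
    (fun (acc : List Int × List Int) i =>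
      let s := i * q + min i r
      (acc.1 ++ [s], acc.2 ++ [s + q + (if i < r then 1 else 0)]))
    ([], [])
-- ===== PRECONDITION & SPEC =====
-- Pre_ excludes exactly num_threads = 0, where the Python A raises ZeroDivisionError.
def Pre_split_tasks_evenly_py (num_threads : Int) (num_processes : Int) : Prop :=
  num_threads ≠ 0
instance (num_threads : Int) (num_processes : Int) : Decidable (Pre_split_tasks_evenly_py num_threads num_processes) := by unfold Pre_split_tasks_evenly_py; infer_instance

def pvWitness_split_tasks_evenly_py : Int × Int := (3, 10)

def Spec_split_tasks_evenly_py (num_threads : Int) (num_processes : Int) (out : List Int × List Int) : Prop := out = split_tasks_evenly_py_alt num_threads num_processes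
instance (num_threads : Int) (num_processes : Int) (out : List Int × List Int) : Decidable (Spec_split_tasks_evenly_py num_threads num_processes out) := by unfold Spec_split_tasks_evenly_py; infer_instance

-- ===== CLAIM (what is proved, stated in full; the proofs are below) =====
def Claim_equal_split_tasks_evenly_py : Prop := ∀ (num_threads : Int) (num_processes : Int), Dom_split_tasks_evenly_py num_threads num_processes → Pre_split_tasks_evenly_py num_threads num_processes → Spec_split_tasks_evenly_py num_threads num_processes (split_tasks_evenly_py num_threads num_processes)

-- ===== LEMMAS AND PROOFS =====

-- closed form of A's append loop
theorem pvLoopA_eq (inc : Int) (n : Nat) (s e : List Int) (last : Int) :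
    pvLoopA inc n s e last =
      (s ++ (List.range n).map (fun i : Nat => last + (i : Int) * inc),
       e ++ (List.range n).map (fun i : Nat => last + ((i : Int) + 1) * inc),
       last + n * inc) := by
  induction n generalizing s e last with
  | zero => simp [pvLoopA]
  | succ n ih =>
    rw [pvLoopA, ih, List.range_succ_eq_map]
    refine Prod.ext ?_ (Prod.ext ?_ ?_) <;>
      simp only [List.map_cons, List.map_map, List.append_assoc, List.singleton_append,
        Nat.cast_zero, zero_mul, add_zero]
    · congr 1
      congr 1
      apply List.map_congr_left; intro i _; simp only [Function.comp_apply]; push_cast; ring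
    · congr 1
      congr 1
      · ring
      · apply List.map_congr_left; intro i _; simp only [Function.comp_apply]; push_cast; ring
    · push_cast; ring

-- closed form of B's foldl over any list
theorem pvFoldB_eq (q r : Int) (l : List Int) (s e : List Int) :
    l.foldl
      (fun (acc : List Int × List Int) i =>
        let x := i * q + min i r
        (acc.1 ++ [x], acc.2 ++ [x + q + (if i < r then 1 else 0)])) (s, e) =
      (s ++ l.map (fun i => i * q + min i r),
       e ++ l.map (fun i => i * q + min i r + q + (if i < r then 1 else 0))) := by
  induction l generalizing s e with
  | nil => simp
  | cons a l ih => simp [List.foldl_cons, ih]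

-- the core equivalence, for any nonzero num_threads
theorem pvMain (nt p : Int) (hnt : nt ≠ 0) :
    split_tasks_evenly_py nt p = split_tasks_evenly_py_alt nt p := by
  unfold split_tasks_evenly_py split_tasks_evenly_py_alt
  simp only [pvLoopA_eq, pvFoldB_eq, List.nil_append]
  set q := Int.tdiv p nt with hq
  set r := PySem.Int.mod p nt with hr
  rcases lt_or_gt_of_ne hnt with hneg | hpos
  · have hb := PySem.Int.mod_neg_bounds p (b := nt) hneg
    have h1 : r.toNat = 0 := by omega
    have h2 : ((nt + 1) - (r + 1)).toNat = 0 := by omega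
    rw [PySem.List.pyRange_one_eq_nil (by omega : nt ≤ 0)]
    simp [h1]
    omega
  · have hr0 : 0 ≤ r := PySem.Int.mod_nonneg p hpos
    have hrlt : r < nt := PySem.Int.mod_lt p hpos
    rw [PySem.List.pyRange_one]
    have hsplit : (nt - 0).toNat = r.toNat + ((nt + 1) - (r + 1)).toNat := by omega
    rw [hsplit, List.range_add, List.map_append, List.map_append, List.map_append]
    refine Prod.ext ?_ ?_ <;>
      simp only [List.map_map, Function.comp_def, zero_add] <;> congr 1
    · apply List.map_congr_left
      intro i hi
      simp only [List.mem_range] at hi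
      rw [min_eq_left (by omega : (i : Int) ≤ r)]
      ring
    · apply List.map_congr_left
      intro i hi
      rw [min_eq_right (by push_cast; omega : r ≤ ((r.toNat + i : Nat) : Int))]
      push_cast
      simp only [Int.toNat_of_nonneg hr0]
      ring
    · apply List.map_congr_left
      intro i hi
      simp only [List.mem_range] at hi
      rw [min_eq_left (by omega : (i : Int) ≤ r), if_pos (by omega : (i : Int) < r)]
      ring
    · apply List.map_congr_left
      intro i hi
      rw [min_eq_right (by push_cast; omega : r ≤ ((r.toNat + i : Nat) : Int)),
        if_neg (by push_cast; omega : ¬ ((r.toNat + i : Nat) : Int) < r)]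
      push_cast
      simp only [Int.toNat_of_nonneg hr0]
      ring

-- ===== VERDICT (by name: the statement is the Claim_ definition above) =====
theorem split_tasks_evenly_py_spec : Claim_equal_split_tasks_evenly_py := by
  intro nt p _ hnt
  exact pvMain nt p hnt
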